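-- pv_equiv track=rewrite | github.com/JordanH821/bctci | 27/27.8.py | solution
-- ===== SOURCE A (Python) =====
-- def solution(a1: list[int], a2: list[int], a3: list[int]) -> list[int]:
-- 	i1: int = 0
-- 	i2: int = 0
-- 	i3: int = 0
-- 	result: list[int] = []
-- 	while i1 < len(a1) or i2 < len(a2) or i3 < len(a3):
-- 		values: list[int] = []
-- 		if i1 < len(a1):
-- 			values.append(a1[i1])
-- 		if i2 < len(a2):
-- 			values.append(a2[i2])
-- 		if i3 < len(a3):
-- 			values.append(a3[i3])
--
-- 		min_value: int = min(values)
-- 		if i1 < len(a1) and a1[i1] == min_value: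
-- 			i1 += 1
-- 		elif i2 < len(a2) and a2[i2] == min_value:
-- 			i2 += 1
-- 		elif i3 < len(a3) and a3[i3] == min_value:
-- 			i3 += 1
--
-- 		if result and result[-1] == min_value:
-- 			# skip duplicate
-- 			continue
-- 		else:
-- 			result.append(min_value)
-- 	return result
-- ===== SOURCE B (Python) =====
-- def solution(a1: list[int], a2: list[int], a3: list[int]) -> list[int]:
--     m = _merge2(_merge2(a1, a2), a3)
--     return m[:1] + [b for a, b in zip(m, m[1:]) if a != b]
--
--
-- def _merge2(xs: list[int], ys: list[int]) -> list[int]: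
--     out: list[int] = []
--     i = j = 0
--     while i < len(xs) and j < len(ys):
--         if xs[i] <= ys[j]:
--             out.append(xs[i])
--             i += 1
--         else:
--             out.append(ys[j])
--             j += 1
--     return out + xs[i:] + ys[j:]
-- ===== Notes on version B (the rewrite author's own statement) =====
-- stated objective: alternative
-- what changed: Replaces A's single-pass 3-pointer loop (min of current heads with inline duplicate suppression) by staged passes: two left-biased binary merges (a1 with a2, then the result with a3) followed by a separate zip-with-predecessor pass that drops consecutive duplicates.
import Mathlib
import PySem

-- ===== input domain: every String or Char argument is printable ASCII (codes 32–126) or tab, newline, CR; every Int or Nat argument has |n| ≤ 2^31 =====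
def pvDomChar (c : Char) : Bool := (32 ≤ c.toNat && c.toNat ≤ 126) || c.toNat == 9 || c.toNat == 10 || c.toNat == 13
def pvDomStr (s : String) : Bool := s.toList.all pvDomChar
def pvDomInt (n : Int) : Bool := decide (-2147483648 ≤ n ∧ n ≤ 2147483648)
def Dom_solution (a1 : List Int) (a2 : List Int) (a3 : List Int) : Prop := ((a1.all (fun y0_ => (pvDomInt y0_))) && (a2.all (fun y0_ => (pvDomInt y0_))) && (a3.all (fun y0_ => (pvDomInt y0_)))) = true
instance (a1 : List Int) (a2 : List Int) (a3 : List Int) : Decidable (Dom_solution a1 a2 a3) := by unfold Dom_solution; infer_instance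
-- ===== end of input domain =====

-- B replaces A's single-pass 3-pointer merge with inline dedup by staged passes:
-- two left-biased binary merges (a1 with a2, then with a3) and a separate
-- zip-with-predecessor pass that drops consecutive duplicates.

-- ===== PORT A =====
-- A's loop over indices i1,i2,i3 is ported with the remaining suffixes r1,r2,r3
-- (a1[i1] = head of suffix, i1 += 1 = drop the head); the while loop is a fueled
-- recursion (fuel = total remaining length, enough since each iteration consumes one element).

-- `values` list of A (heads of the non-exhausted arrays, in order)
def pvValues (r1 r2 r3 : List Int) : List Int :=
  (if r1 ≠ [] then [r1.headI] else []) ++ (if r2 ≠ [] then [r2.headI] else []) ++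
    (if r3 ≠ [] then [r3.headI] else [])

-- `min_value = min(values)` of A
def pvMin (r1 r2 r3 : List Int) : Int :=
  (PySem.List.min? (pvValues r1 r2 r3) (fun x => x)).getD 0

-- A's if/elif/elif chain advancing exactly one pointer
def pvAdvance (r1 r2 r3 : List Int) : List Int × List Int × List Int :=
  let m := pvMin r1 r2 r3
  if r1 ≠ [] ∧ r1.headI = m then (r1.tail, r2, r3)
  else if r2 ≠ [] ∧ r2.headI = m then (r1, r2.tail, r3)
  else if r3 ≠ [] ∧ r3.headI = m then (r1, r2, r3.tail)
  else (r1, r2, r3)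

def loopA : Nat → List Int → List Int → List Int → List Int → List Int
  | 0, _, _, _, result => result
  | fuel + 1, r1, r2, r3, result =>
    if r1 = [] ∧ r2 = [] ∧ r3 = [] then result
    else
      let m := pvMin r1 r2 r3
      let s := pvAdvance r1 r2 r3
      let result' := if result ≠ [] ∧ result.getLast? = some m then result else result ++ [m]
      loopA fuel s.1 s.2.1 s.2.2 result'

def solution (a1 : List Int) (a2 : List Int) (a3 : List Int) : List Int :=
  loopA (a1.length + a2.length + a3.length) a1 a2 a3 []

-- ===== PORT B =====
-- B's `_merge2` while loop over indices i,j is ported with the remaining suffixes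
-- (xs[i] = head of suffix, i += 1 = drop the head), `out` as the accumulator;
-- on exit `out + xs[i:] + ys[j:]` is `out ++ xs ++ ys` on the suffixes.
def mergeLoop : List Int → List Int → List Int → List Int
  | x :: xs, y :: ys, out =>
    if x ≤ y then mergeLoop xs (y :: ys) (out ++ [x])
    else mergeLoop (x :: xs) ys (out ++ [y])
  | xs, ys, out => out ++ xs ++ ys
termination_by xs ys _ => xs.length + ys.length

def merge2Alt (xs ys : List Int) : List Int := mergeLoop xs ys []

-- `m[:1] + [b for a, b in zip(m, m[1:]) if a != b]`
-- (m[:1] / m[1:] with nonnegative bounds are exactly List.take 1 / List.drop 1)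
def solution_alt (a1 : List Int) (a2 : List Int) (a3 : List Int) : List Int :=
  let m := merge2Alt (merge2Alt a1 a2) a3
  m.take 1 ++ ((m.zip (m.drop 1)).filter (fun p => p.1 ≠ p.2)).map Prod.snd

-- ===== PRECONDITION & SPEC =====
def Spec_solution (a1 : List Int) (a2 : List Int) (a3 : List Int) (out : List Int) : Prop := out = solution_alt a1 a2 a3
instance (a1 : List Int) (a2 : List Int) (a3 : List Int) (out : List Int) : Decidable (Spec_solution a1 a2 a3 out) := by unfold Spec_solution; infer_instance

-- ===== CLAIM (what is proved, stated in full; the proofs are below) =====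
def Claim_equal_solution : Prop := ∀ (a1 : List Int) (a2 : List Int) (a3 : List Int), Dom_solution a1 a2 a3 → Spec_solution a1 a2 a3 (solution a1 a2 a3)

-- ===== LEMMAS AND PROOFS =====

-- proof-only helpers: the pure binary merge behind mergeLoop, the 3-way merged
-- value sequence of A's loop, and the consecutive-dedup it interleaves
def m2 : List Int → List Int → List Int
  | [], ys => ys
  | xs, [] => xs
  | x :: xs, y :: ys => if x ≤ y then x :: m2 xs (y :: ys) else y :: m2 (x :: xs) ys
termination_by xs ys => xs.length + ys.length

def merge3 : List Int → List Int → List Int → List Int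
  | [], [], [] => []
  | [], [], z :: cs => z :: merge3 [] [] cs
  | [], y :: bs, [] => y :: merge3 [] bs []
  | [], y :: bs, z :: cs =>
    if y ≤ z then y :: merge3 [] bs (z :: cs) else z :: merge3 [] (y :: bs) cs
  | x :: as, [], [] => x :: merge3 as [] []
  | x :: as, [], z :: cs =>
    if x ≤ z then x :: merge3 as [] (z :: cs) else z :: merge3 (x :: as) [] cs
  | x :: as, y :: bs, [] =>
    if x ≤ y then x :: merge3 as (y :: bs) [] else y :: merge3 (x :: as) bs []
  | x :: as, y :: bs, z :: cs =>
    if x ≤ y ∧ x ≤ z then x :: merge3 as (y :: bs) (z :: cs)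
    else if y ≤ z then y :: merge3 (x :: as) bs (z :: cs)
    else z :: merge3 (x :: as) (y :: bs) cs
termination_by a b c => a.length + b.length + c.length

def dedupFrom : Option Int → List Int → List Int
  | _, [] => []
  | last, x :: xs => if last = some x then dedupFrom last xs else x :: dedupFrom (some x) xs

-- one step of A's loop is one step of merge3, split by which inputs are exhausted:
-- the chosen min is merge3's head and the advanced state is merge3's tail state
theorem step_ccc (x y z : Int) (as bs cs : List Int) :
    merge3 (x::as) (y::bs) (z::cs) =
      pvMin (x::as) (y::bs) (z::cs) ::
        merge3 (pvAdvance (x::as) (y::bs) (z::cs)).1 (pvAdvance (x::as) (y::bs) (z::cs)).2.1 (pvAdvance (x::as) (y::bs) (z::cs)).2.2 ∧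
    (pvAdvance (x::as) (y::bs) (z::cs)).1.length + (pvAdvance (x::as) (y::bs) (z::cs)).2.1.length +
        (pvAdvance (x::as) (y::bs) (z::cs)).2.2.length + 1 = (x::as).length + (y::bs).length + (z::cs).length := by
  have hv : pvValues (x::as) (y::bs) (z::cs) = [x, y, z] := by simp [pvValues]
  obtain ⟨w, hw⟩ : ∃ w, PySem.List.min? [x, y, z] (fun a => a) = some w :=
    ⟨_, PySem.List.min?_id_cons x [y, z]⟩
  have hm : pvMin (x::as) (y::bs) (z::cs) = w := by simp [pvMin, hv, hw]
  have hor : w = x ∨ w = y ∨ w = z := by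
    have := PySem.List.min?_mem hw; simpa using this
  have hlx : w ≤ x := PySem.List.min?_isMin hw x (by simp)
  have hly : w ≤ y := PySem.List.min?_isMin hw y (by simp)
  have hlz : w ≤ z := PySem.List.min?_isMin hw z (by simp)
  by_cases h1 : x = w
  · have ha : pvAdvance (x::as) (y::bs) (z::cs) = (as, y::bs, z::cs) := by
      rw [pvAdvance]
      simp only [List.headI, List.tail_cons, ne_eq, reduceCtorEq, not_false_eq_true, true_and, hm]
      rw [if_pos h1]
    rw [ha, merge3, if_pos (⟨by omega, by omega⟩ : x ≤ y ∧ x ≤ z), hm]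
    exact ⟨by rw [h1], by simp only [List.length_cons]; omega⟩
  · by_cases h2 : y = w
    · have ha : pvAdvance (x::as) (y::bs) (z::cs) = (x::as, bs, z::cs) := by
        rw [pvAdvance]
        simp only [List.headI, List.tail_cons, ne_eq, reduceCtorEq, not_false_eq_true, true_and, hm]
        rw [if_neg h1, if_pos h2]
      rw [ha, merge3, if_neg (by omega : ¬(x ≤ y ∧ x ≤ z)), if_pos (by omega : y ≤ z), hm]
      exact ⟨by rw [h2], by simp only [List.length_cons]; omega⟩
    · have h3 : z = w := by
        rcases hor with h | h | h
        · exact absurd h.symm h1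
        · exact absurd h.symm h2
        · exact h.symm
      have ha : pvAdvance (x::as) (y::bs) (z::cs) = (x::as, y::bs, cs) := by
        rw [pvAdvance]
        simp only [List.headI, List.tail_cons, ne_eq, reduceCtorEq, not_false_eq_true, true_and, hm]
        rw [if_neg h1, if_neg h2, if_pos h3]
      rw [ha, merge3, if_neg (by omega : ¬(x ≤ y ∧ x ≤ z)), if_neg (by omega : ¬ y ≤ z), hm]
      exact ⟨by rw [h3], by simp only [List.length_cons]; omega⟩

theorem step_ccn (x y : Int) (as bs : List Int) :
    merge3 (x::as) (y::bs) [] =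
      pvMin (x::as) (y::bs) [] ::
        merge3 (pvAdvance (x::as) (y::bs) []).1 (pvAdvance (x::as) (y::bs) []).2.1 (pvAdvance (x::as) (y::bs) []).2.2 ∧
    (pvAdvance (x::as) (y::bs) []).1.length + (pvAdvance (x::as) (y::bs) []).2.1.length +
        (pvAdvance (x::as) (y::bs) []).2.2.length + 1 = (x::as).length + (y::bs).length + ([] : List Int).length := by
  have hv : pvValues (x::as) (y::bs) [] = [x, y] := by simp [pvValues]
  obtain ⟨w, hw⟩ : ∃ w, PySem.List.min? [x, y] (fun a => a) = some w :=
    ⟨_, PySem.List.min?_id_cons x [y]⟩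
  have hm : pvMin (x::as) (y::bs) [] = w := by simp [pvMin, hv, hw]
  have hor : w = x ∨ w = y := by
    have := PySem.List.min?_mem hw; simpa using this
  have hlx : w ≤ x := PySem.List.min?_isMin hw x (by simp)
  have hly : w ≤ y := PySem.List.min?_isMin hw y (by simp)
  by_cases h1 : x = w
  · have ha : pvAdvance (x::as) (y::bs) [] = (as, y::bs, []) := by
      rw [pvAdvance]
      simp only [List.headI, List.tail_cons, ne_eq, reduceCtorEq, not_false_eq_true, true_and, hm]
      rw [if_pos h1]
    rw [ha, merge3, if_pos (by omega : x ≤ y), hm]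
    exact ⟨by rw [h1], by simp only [List.length_cons]; omega⟩
  · have h2 : y = w := by
      rcases hor with h | h
      · exact absurd h.symm h1
      · exact h.symm
    have ha : pvAdvance (x::as) (y::bs) [] = (x::as, bs, []) := by
      rw [pvAdvance]
      simp only [List.headI, List.tail_cons, ne_eq, reduceCtorEq, not_false_eq_true, true_and, hm]
      rw [if_neg h1, if_pos h2]
    rw [ha, merge3, if_neg (by omega : ¬ x ≤ y), hm]
    exact ⟨by rw [h2], by simp only [List.length_cons]; omega⟩

theorem step_cnc (x z : Int) (as cs : List Int) :
    merge3 (x::as) [] (z::cs) =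
      pvMin (x::as) [] (z::cs) ::
        merge3 (pvAdvance (x::as) [] (z::cs)).1 (pvAdvance (x::as) [] (z::cs)).2.1 (pvAdvance (x::as) [] (z::cs)).2.2 ∧
    (pvAdvance (x::as) [] (z::cs)).1.length + (pvAdvance (x::as) [] (z::cs)).2.1.length +
        (pvAdvance (x::as) [] (z::cs)).2.2.length + 1 = (x::as).length + ([] : List Int).length + (z::cs).length := by
  have hv : pvValues (x::as) [] (z::cs) = [x, z] := by simp [pvValues]
  obtain ⟨w, hw⟩ : ∃ w, PySem.List.min? [x, z] (fun a => a) = some w :=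
    ⟨_, PySem.List.min?_id_cons x [z]⟩
  have hm : pvMin (x::as) [] (z::cs) = w := by simp [pvMin, hv, hw]
  have hor : w = x ∨ w = z := by
    have := PySem.List.min?_mem hw; simpa using this
  have hlx : w ≤ x := PySem.List.min?_isMin hw x (by simp)
  have hlz : w ≤ z := PySem.List.min?_isMin hw z (by simp)
  by_cases h1 : x = w
  · have ha : pvAdvance (x::as) [] (z::cs) = (as, [], z::cs) := by
      rw [pvAdvance]
      simp only [List.headI, List.tail_cons, ne_eq, reduceCtorEq, not_false_eq_true, true_and,
        not_true_eq_false, false_and, if_false, hm]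
      rw [if_pos h1]
    rw [ha, merge3, if_pos (by omega : x ≤ z), hm]
    exact ⟨by rw [h1], by simp only [List.length_cons]; omega⟩
  · have h3 : z = w := by
      rcases hor with h | h
      · exact absurd h.symm h1
      · exact h.symm
    have ha : pvAdvance (x::as) [] (z::cs) = (x::as, [], cs) := by
      rw [pvAdvance]
      simp only [List.headI, List.tail_cons, ne_eq, reduceCtorEq, not_false_eq_true, true_and,
        not_true_eq_false, false_and, if_false, hm]
      rw [if_neg h1, if_pos h3]
    rw [ha, merge3, if_neg (by omega : ¬ x ≤ z), hm]
    exact ⟨by rw [h3], by simp only [List.length_cons]; omega⟩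

theorem step_ncc (y z : Int) (bs cs : List Int) :
    merge3 [] (y::bs) (z::cs) =
      pvMin [] (y::bs) (z::cs) ::
        merge3 (pvAdvance [] (y::bs) (z::cs)).1 (pvAdvance [] (y::bs) (z::cs)).2.1 (pvAdvance [] (y::bs) (z::cs)).2.2 ∧
    (pvAdvance [] (y::bs) (z::cs)).1.length + (pvAdvance [] (y::bs) (z::cs)).2.1.length +
        (pvAdvance [] (y::bs) (z::cs)).2.2.length + 1 = ([] : List Int).length + (y::bs).length + (z::cs).length := by
  have hv : pvValues [] (y::bs) (z::cs) = [y, z] := by simp [pvValues]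
  obtain ⟨w, hw⟩ : ∃ w, PySem.List.min? [y, z] (fun a => a) = some w :=
    ⟨_, PySem.List.min?_id_cons y [z]⟩
  have hm : pvMin [] (y::bs) (z::cs) = w := by simp [pvMin, hv, hw]
  have hor : w = y ∨ w = z := by
    have := PySem.List.min?_mem hw; simpa using this
  have hly : w ≤ y := PySem.List.min?_isMin hw y (by simp)
  have hlz : w ≤ z := PySem.List.min?_isMin hw z (by simp)
  by_cases h2 : y = w
  · have ha : pvAdvance [] (y::bs) (z::cs) = ([], bs, z::cs) := by
      rw [pvAdvance]
      simp only [List.headI, List.tail_cons, ne_eq, reduceCtorEq, not_false_eq_true, true_and,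
        not_true_eq_false, false_and, if_false, hm]
      rw [if_pos h2]
    rw [ha, merge3, if_pos (by omega : y ≤ z), hm]
    exact ⟨by rw [h2], by simp only [List.length_cons]; omega⟩
  · have h3 : z = w := by
      rcases hor with h | h
      · exact absurd h.symm h2
      · exact h.symm
    have ha : pvAdvance [] (y::bs) (z::cs) = ([], y::bs, cs) := by
      rw [pvAdvance]
      simp only [List.headI, List.tail_cons, ne_eq, reduceCtorEq, not_false_eq_true, true_and,
        not_true_eq_false, false_and, if_false, hm]
      rw [if_neg h2, if_pos h3]
    rw [ha, merge3, if_neg (by omega : ¬ y ≤ z), hm]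
    exact ⟨by rw [h3], by simp only [List.length_cons]; omega⟩

theorem merge3_step (r1 r2 r3 : List Int) (h : ¬(r1 = [] ∧ r2 = [] ∧ r3 = [])) :
    merge3 r1 r2 r3 =
      pvMin r1 r2 r3 ::
        merge3 (pvAdvance r1 r2 r3).1 (pvAdvance r1 r2 r3).2.1 (pvAdvance r1 r2 r3).2.2 ∧
    (pvAdvance r1 r2 r3).1.length + (pvAdvance r1 r2 r3).2.1.length +
        (pvAdvance r1 r2 r3).2.2.length + 1 = r1.length + r2.length + r3.length := by
  rcases r1 with _ | ⟨x, as⟩ <;> rcases r2 with _ | ⟨y, bs⟩ <;> rcases r3 with _ | ⟨z, cs⟩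
  · exact absurd ⟨rfl, rfl, rfl⟩ h
  · refine ⟨?_, ?_⟩ <;>
      simp [pvAdvance, pvMin, pvValues, merge3, PySem.List.min?_id_cons]
  · refine ⟨?_, ?_⟩ <;>
      simp [pvAdvance, pvMin, pvValues, merge3, PySem.List.min?_id_cons]
  · exact step_ncc y z bs cs
  · refine ⟨?_, ?_⟩ <;>
      simp [pvAdvance, pvMin, pvValues, merge3, PySem.List.min?_id_cons]
  · exact step_cnc x z as cs
  · exact step_ccn x y as bs
  · exact step_ccc x y z as bs cs

theorem loopA_eq (fuel : Nat) :
    ∀ (r1 r2 r3 res : List Int), r1.length + r2.length + r3.length ≤ fuel →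
      loopA fuel r1 r2 r3 res = res ++ dedupFrom res.getLast? (merge3 r1 r2 r3) := by
  induction fuel with
  | zero =>
    intro r1 r2 r3 res h
    have h1 : r1 = [] := by cases r1 <;> simp_all
    have h2 : r2 = [] := by cases r2 <;> simp_all
    have h3 : r3 = [] := by cases r3 <;> simp_all
    subst h1; subst h2; subst h3
    simp [loopA, merge3, dedupFrom]
  | succ n ih =>
    intro r1 r2 r3 res h
    by_cases hnil : r1 = [] ∧ r2 = [] ∧ r3 = []
    · obtain ⟨h1, h2, h3⟩ := hnil; subst h1; subst h2; subst h3
      simp [loopA, merge3, dedupFrom]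
    · obtain ⟨hm, hlen⟩ := merge3_step r1 r2 r3 hnil
      have hfit : (pvAdvance r1 r2 r3).1.length + (pvAdvance r1 r2 r3).2.1.length +
          (pvAdvance r1 r2 r3).2.2.length ≤ n := by omega
      simp only [loopA, if_neg hnil]
      rw [ih _ _ _ _ hfit, hm]
      by_cases hdup : res ≠ [] ∧ res.getLast? = some (pvMin r1 r2 r3)
      · rw [if_pos hdup]
        simp [dedupFrom, hdup.2]
      · rw [if_neg hdup]
        have hne : ¬ res.getLast? = some (pvMin r1 r2 r3) := by
          intro hc
          exact hdup ⟨by rintro rfl; simp at hc, hc⟩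
        simp [dedupFrom, hne, List.getLast?_append]

-- B's accumulator loop computes the pure binary merge
theorem mergeLoop_eq_m2 : ∀ (xs ys out : List Int), mergeLoop xs ys out = out ++ m2 xs ys := by
  intro xs ys
  induction xs, ys using m2.induct with
  | case1 ys => intro out; cases ys <;> simp [mergeLoop, m2]
  | case2 xs h => intro out; cases xs with
    | nil => simp [mergeLoop, m2]
    | cons x xs => simp [mergeLoop, m2]
  | case3 x xs y ys hle ih =>
    intro out
    rw [mergeLoop, if_pos hle, ih, m2, if_pos hle]
    simp
  | case4 x xs y ys hle ih =>
    intro out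
    rw [mergeLoop, if_neg hle, ih, m2, if_neg hle]
    simp

theorem merge3_onlya : ∀ (a : List Int), merge3 a [] [] = a := by
  intro a
  induction a with
  | nil => simp [merge3]
  | cons x as ih => rw [merge3, ih]

theorem merge3_onlyb : ∀ (b : List Int), merge3 [] b [] = b := by
  intro b
  induction b with
  | nil => simp [merge3]
  | cons y bs ih => rw [merge3, ih]

theorem merge3_onlyc : ∀ (c : List Int), merge3 [] [] c = c := by
  intro c
  induction c with
  | nil => simp [merge3]
  | cons z cs ih => rw [merge3, ih]

theorem merge3_nil_left : ∀ (b c : List Int), merge3 [] b c = m2 b c := by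
  intro b c
  induction b, c using m2.induct with
  | case1 c => rw [merge3_onlyc]; cases c <;> simp [m2]
  | case2 b h => rw [merge3_onlyb]; cases b <;> simp [m2]
  | case3 y bs z cs hle ih => rw [merge3, if_pos hle, ih, m2, if_pos hle]
  | case4 y bs z cs hle ih => rw [merge3, if_neg hle, ih, m2, if_neg hle]

theorem merge3_nil_mid : ∀ (a c : List Int), merge3 a [] c = m2 a c := by
  intro a c
  induction a, c using m2.induct with
  | case1 c => rw [merge3_onlyc]; cases c <;> simp [m2]
  | case2 a h => rw [merge3_onlya]; cases a <;> simp [m2]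
  | case3 x as z cs hle ih => rw [merge3, if_pos hle, ih, m2, if_pos hle]
  | case4 x as z cs hle ih => rw [merge3, if_neg hle, ih, m2, if_neg hle]

theorem merge3_nil_right : ∀ (a b : List Int), merge3 a b [] = m2 a b := by
  intro a b
  induction a, b using m2.induct with
  | case1 b => rw [merge3_onlyb]; cases b <;> simp [m2]
  | case2 a h => rw [merge3_onlya]; cases a <;> simp [m2]
  | case3 x as y bs hle ih => rw [merge3, if_pos hle, ih, m2, if_pos hle]
  | case4 x as y bs hle ih => rw [merge3, if_neg hle, ih, m2, if_neg hle]

-- the staged binary merges compute the 3-way merge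
theorem m2_m2_eq_merge3 (n : Nat) :
    ∀ (a b c : List Int), a.length + b.length + c.length ≤ n →
      m2 (m2 a b) c = merge3 a b c := by
  induction n with
  | zero =>
    intro a b c h
    have h1 : a = [] := by cases a <;> simp_all
    have h2 : b = [] := by cases b <;> simp_all
    have h3 : c = [] := by cases c <;> simp_all
    subst h1; subst h2; subst h3; simp [m2, merge3]
  | succ n ih =>
    intro a b c h
    rcases a with _ | ⟨x, as⟩
    · rw [merge3_nil_left, show m2 ([] : List Int) b = b from by simp [m2]]
    rcases b with _ | ⟨y, bs⟩
    · rw [show m2 (x::as) ([] : List Int) = x::as from by simp [m2], merge3_nil_mid]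
    rcases c with _ | ⟨z, cs⟩
    · rw [merge3_nil_right]
      cases hxy : m2 (x::as) (y::bs) with
      | nil => simp [m2]
      | cons h t => simp [m2]
    simp only [List.length_cons] at h
    by_cases hxy : x ≤ y
    · rw [show m2 (x::as) (y::bs) = x :: m2 as (y::bs) from by rw [m2, if_pos hxy]]
      by_cases hxz : x ≤ z
      · rw [show m2 (x :: m2 as (y::bs)) (z::cs) = x :: m2 (m2 as (y::bs)) (z::cs) from by
          rw [m2, if_pos hxz]]
        rw [merge3, if_pos ⟨hxy, hxz⟩, ih as (y::bs) (z::cs) (by simp; omega)]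
      · rw [show m2 (x :: m2 as (y::bs)) (z::cs) = z :: m2 (x :: m2 as (y::bs)) cs from by
          rw [m2, if_neg hxz]]
        rw [show (x :: m2 as (y::bs)) = m2 (x::as) (y::bs) from by rw [m2, if_pos hxy]]
        rw [merge3, if_neg (by rintro ⟨_, h⟩; exact hxz h),
          if_neg (fun hyz => hxz (le_trans hxy hyz)),
          ih (x::as) (y::bs) cs (by simp; omega)]
    · rw [show m2 (x::as) (y::bs) = y :: m2 (x::as) bs from by rw [m2, if_neg hxy]]
      by_cases hyz : y ≤ z
      · rw [show m2 (y :: m2 (x::as) bs) (z::cs) = y :: m2 (m2 (x::as) bs) (z::cs) from by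
          rw [m2, if_pos hyz]]
        rw [merge3, if_neg (by rintro ⟨h, _⟩; exact hxy h), if_pos hyz,
          ih (x::as) bs (z::cs) (by simp; omega)]
      · rw [show m2 (y :: m2 (x::as) bs) (z::cs) = z :: m2 (y :: m2 (x::as) bs) cs from by
          rw [m2, if_neg hyz]]
        rw [show (y :: m2 (x::as) bs) = m2 (x::as) (y::bs) from by rw [m2, if_neg hxy]]
        rw [merge3, if_neg (by rintro ⟨h, _⟩; exact hxy h), if_neg hyz,
          ih (x::as) (y::bs) cs (by simp; omega)]

-- the zip-with-predecessor pass equals the run-dedup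
theorem dedupFrom_some (x : Int) : ∀ (xs : List Int),
    dedupFrom (some x) xs = (((x :: xs).zip xs).filter (fun p => p.1 ≠ p.2)).map Prod.snd := by
  intro xs
  induction xs generalizing x with
  | nil => simp [dedupFrom]
  | cons y ys ih =>
    by_cases h : x = y
    · subst h
      rw [dedupFrom, if_pos rfl, ih]
      simp [List.zip]
    · rw [dedupFrom, if_neg (by simpa using h), ih]
      simp [List.zip, h]

theorem dedup_eq (m : List Int) :
    dedupFrom none m = m.take 1 ++ ((m.zip (m.drop 1)).filter (fun p => p.1 ≠ p.2)).map Prod.snd := by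
  cases m with
  | nil => simp [dedupFrom]
  | cons x xs =>
    rw [dedupFrom]
    simp only [reduceCtorEq, if_false, List.take_succ_cons, List.take_zero, List.drop_succ_cons,
      List.drop_zero, List.cons_append, List.nil_append]
    rw [dedupFrom_some]

-- ===== VERDICT (by name: the statement is the Claim_ definition above) =====
theorem solution_spec : Claim_equal_solution := by
  intro a1 a2 a3 _
  unfold Spec_solution solution solution_alt merge2Alt
  rw [loopA_eq _ a1 a2 a3 [] le_rfl, mergeLoop_eq_m2, mergeLoop_eq_m2]
  simp only [List.nil_append, List.getLast?_nil]
  rw [m2_m2_eq_merge3 (a1.length + a2.length + a3.length) a1 a2 a3 le_rfl, dedup_eq]
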